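-- pv_equiv track=rewrite | github.com/HAAIL-Universe/ForgeGuard | forge_ide/journal.py | _trim_summary
-- ===== SOURCE A (Python) =====
-- def _trim_summary(text: str, max_chars: int) -> str:
--     """Trim summary to fit within *max_chars*, keeping structure."""
--     lines = text.split("\n")
--     # Always keep first 3 and last 3 lines (header + footer)
--     head = lines[:3]
--     tail = lines[-3:]
--     middle = lines[3:-3]
--
--     budget = max_chars - sum(len(l) + 1 for l in head + tail) - 40
--     kept: list[str] = []
--     used = 0
--     for line in middle:
--         if used + len(line) + 1 > budget:
--             kept.append(f"... ({len(middle) - len(kept)} lines trimmed) ...")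
--             break
--         kept.append(line)
--         used += len(line) + 1
--
--     return "\n".join(head + kept + tail)
-- ===== SOURCE B (Python) =====
-- from itertools import accumulate
-- from bisect import bisect_right
--
--
-- def _trim_summary(text: str, max_chars: int) -> str:
--     """Trim summary to fit within *max_chars*, keeping structure."""
--     lines = text.split("\n")
--     head = lines[:3]
--     tail = lines[-3:]
--     middle = lines[3:-3]
--
--     budget = max_chars - 40 - sum(len(l) + 1 for l in head + tail)
--     prefix = list(accumulate(len(l) + 1 for l in middle))
--     k = bisect_right(prefix, budget)
--     kept = middle[:k]
--     if k < len(middle):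
--         kept.append(f"... ({len(middle) - k} lines trimmed) ...")
--     return "\n".join(head + kept + tail)
-- ===== Notes on version B (the rewrite author's own statement) =====
-- stated objective: alternative
-- what changed: Replaces A's stateful scan-and-break loop over the middle lines with a prefix-sum table of per-line costs (itertools.accumulate) and a bisect_right lookup for the cutoff index, then slices middle[:k] and appends the trim marker if k < len(middle).
import Mathlib
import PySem

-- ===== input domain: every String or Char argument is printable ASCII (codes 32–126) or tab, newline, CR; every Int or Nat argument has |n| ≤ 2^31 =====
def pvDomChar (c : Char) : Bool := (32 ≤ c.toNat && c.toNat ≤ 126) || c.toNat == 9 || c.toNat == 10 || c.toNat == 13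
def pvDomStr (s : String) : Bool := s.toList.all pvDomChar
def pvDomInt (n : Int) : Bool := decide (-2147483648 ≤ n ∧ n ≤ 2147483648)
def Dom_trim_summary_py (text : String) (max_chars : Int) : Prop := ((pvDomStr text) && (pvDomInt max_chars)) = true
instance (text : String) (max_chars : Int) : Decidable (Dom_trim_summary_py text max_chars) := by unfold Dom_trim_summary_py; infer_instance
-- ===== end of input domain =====

-- B replaces A's scan-and-break over the middle lines by a prefix-sum table plus a
-- bisect-style cutoff lookup (itertools.accumulate + bisect_right); alternative, same cost.


-- shared literal: the f-string "... ({n} lines trimmed) ..."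
def pvMarker (n : Int) : String := "... (" ++ PySem.Int.toStr n ++ " lines trimmed) ..."

-- ===== PORT A =====
-- A's for-loop with break: state (used, len(kept)); mlen = len(middle)
def trimLoopA (budget : Int) (mlen : Int) : Int → Int → List String → List String
  | _, _, [] => []
  | used, keptLen, line :: rest =>
    if used + PySem.Str.len line + 1 > budget then
      [pvMarker (mlen - keptLen)]
    else
      line :: trimLoopA budget mlen (used + PySem.Str.len line + 1) (keptLen + 1) rest

def trim_summary_py (text : String) (max_chars : Int) : String :=
  let lines := ((PySem.Chars.splitOn text.toList "\n".toList).map String.ofList)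
  let head := PySem.List.slice lines none (some 3)
  let tail := PySem.List.slice lines (some (-3)) none
  let middle := PySem.List.slice lines (some 3) (some (-3))
  let budget := max_chars - ((head ++ tail).map (fun l => PySem.Str.len l + 1)).sum - 40
  let kept := trimLoopA budget (middle.length : Int) 0 0 middle
  PySem.Str.join "\n" (head ++ kept ++ tail)

-- ===== PORT B =====
-- itertools.accumulate over the per-line costs len(l)+1 (running total starts at acc)
def accumCosts : List String → Int → List Int
  | [], _ => []
  | l :: rest, acc => (acc + PySem.Str.len l + 1) :: accumCosts rest (acc + PySem.Str.len l + 1)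

-- bisect.bisect_right on the (strictly increasing) prefix table = number of entries ≤ budget
def bisectRightLe (pre : List Int) (budget : Int) : Nat :=
  (pre.takeWhile (fun p => decide (p ≤ budget))).length

def trim_summary_py_alt (text : String) (max_chars : Int) : String :=
  let lines := ((PySem.Chars.splitOn text.toList "\n".toList).map String.ofList)
  let head := PySem.List.slice lines none (some 3)
  let tail := PySem.List.slice lines (some (-3)) none
  let middle := PySem.List.slice lines (some 3) (some (-3))
  let budget := max_chars - 40 - ((head ++ tail).map (fun l => PySem.Str.len l + 1)).sum
  let k := bisectRightLe (accumCosts middle 0) budget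
  let kept := middle.take k
  let kept := if k < middle.length then kept ++ [pvMarker ((middle.length : Int) - (k : Int))] else kept
  PySem.Str.join "\n" (head ++ kept ++ tail)

-- ===== PRECONDITION & SPEC =====
def Spec_trim_summary_py (text : String) (max_chars : Int) (out : String) : Prop := out = trim_summary_py_alt text max_chars
instance (text : String) (max_chars : Int) (out : String) : Decidable (Spec_trim_summary_py text max_chars out) := by unfold Spec_trim_summary_py; infer_instance

-- ===== CLAIM (what is proved, stated in full; the proofs are below) =====
def Claim_equal_trim_summary_py : Prop := ∀ (text : String) (max_chars : Int), Dom_trim_summary_py text max_chars → Spec_trim_summary_py text max_chars (trim_summary_py text max_chars)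

-- ===== LEMMAS AND PROOFS =====

-- distributing the optional marker over the append
lemma append_if_singleton {α : Type} (xs : List α) (c : Prop) [Decidable c] (m : α) :
    xs ++ (if c then [m] else []) = if c then xs ++ [m] else xs := by
  split_ifs <;> simp

-- A's break-loop equals B's take-k-plus-marker, for any running total `used` and count `cnt`.
lemma trimLoop_eq (middle : List String) : ∀ (b used cnt mlen : Int),
    mlen - cnt = (middle.length : Int) →
    trimLoopA b mlen used cnt middle =
      middle.take (bisectRightLe (accumCosts middle used) b) ++
        (if bisectRightLe (accumCosts middle used) b < middle.length then
          [pvMarker (mlen - cnt - (bisectRightLe (accumCosts middle used) b : Int))]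
        else []) := by
  induction middle with
  | nil =>
    intro b used cnt mlen h
    simp [trimLoopA, accumCosts, bisectRightLe]
  | cons l rest ih =>
    intro b used cnt mlen h
    simp only [List.length_cons] at h
    have hA : trimLoopA b mlen used cnt (l :: rest)
        = if used + PySem.Str.len l + 1 > b then [pvMarker (mlen - cnt)]
          else l :: trimLoopA b mlen (used + PySem.Str.len l + 1) (cnt + 1) rest := rfl
    have hacc : accumCosts (l :: rest) used
        = (used + PySem.Str.len l + 1) :: accumCosts rest (used + PySem.Str.len l + 1) := rfl
    by_cases hgt : used + PySem.Str.len l + 1 > b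
    · have hb : decide (used + PySem.Str.len l + 1 ≤ b) = false := decide_eq_false (by omega)
      rw [hA, if_pos hgt]
      have hk0 : bisectRightLe (accumCosts (l :: rest) used) b = 0 := by
        simp [bisectRightLe, hacc, List.takeWhile_cons]
        simp [PySem.Str.len_eq] at hgt
        omega
      rw [hk0, if_pos (by simp)]
      simp
    · have hb : decide (used + PySem.Str.len l + 1 ≤ b) = true := decide_eq_true (by omega)
      have hrest : mlen - (cnt + 1) = (rest.length : Int) := by push_cast at h ⊢; omega
      rw [hA, if_neg hgt, ih b (used + PySem.Str.len l + 1) (cnt + 1) mlen hrest]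
      have hkeq : bisectRightLe (accumCosts (l :: rest) used) b
          = bisectRightLe (accumCosts rest (used + PySem.Str.len l + 1)) b + 1 := by
        unfold bisectRightLe
        rw [hacc, List.takeWhile_cons, hb]
        simp [Nat.add_comm]
      rw [hkeq]
      rw [List.take_succ_cons]
      simp only [List.length_cons]
      by_cases hk : bisectRightLe (accumCosts rest (used + PySem.Str.len l + 1)) b < rest.length
      · rw [if_pos hk, if_pos (by omega)]
        have harg : mlen - (cnt + 1)
              - (bisectRightLe (accumCosts rest (used + PySem.Str.len l + 1)) b : Int)
            = mlen - cnt
              - ((bisectRightLe (accumCosts rest (used + PySem.Str.len l + 1)) b + 1 : Nat) : Int) := by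
          push_cast; ring
        rw [harg]
        simp
      · rw [if_neg hk, if_neg (by omega)]
        simp

set_option maxHeartbeats 400000 in
theorem trim_summary_py_spec : Claim_equal_trim_summary_py := by
  intro text max_chars _
  unfold Spec_trim_summary_py trim_summary_py trim_summary_py_alt
  simp only []
  have hbudget :
      max_chars - (((PySem.List.slice (((PySem.Chars.splitOn text.toList "\n".toList).map String.ofList)) none (some 3) ++
          PySem.List.slice (((PySem.Chars.splitOn text.toList "\n".toList).map String.ofList)) (some (-3)) none).map
          (fun l => PySem.Str.len l + 1)).sum) - 40 =
      max_chars - 40 - (((PySem.List.slice (((PySem.Chars.splitOn text.toList "\n".toList).map String.ofList)) none (some 3) ++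
          PySem.List.slice (((PySem.Chars.splitOn text.toList "\n".toList).map String.ofList)) (some (-3)) none).map
          (fun l => PySem.Str.len l + 1)).sum) := by omega
  rw [hbudget]
  apply congrArg
  rw [trimLoop_eq _ _ 0 0 _ (by simp)]
  simp only [sub_zero]
  rw [append_if_singleton]
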